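-- pv_equiv track=rewrite | github.com/magicpineapple/artofamagicpineapple | run.py | getTicktextArray
-- ===== SOURCE A (Python) =====
-- def getTicktextArray(size):
--     ticktextArray = []
--     for i in range(size):
--         if i == 0:
--             ticktextArray.append('RED')
--         elif i == (size - 1):
--             ticktextArray.append('VIOLET')
--         else:
--             ticktextArray.append('')
--     return ticktextArray
-- ===== SOURCE B (Python) =====
-- def getTicktextArray(size):
--     if size <= 0:
--         return []
--     if size == 1:
--         return ['RED']
--     return ['RED'] + [''] * (size - 2) + ['VIOLET']
-- ===== Notes on version B (the rewrite author's own statement) =====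
-- stated objective: simpler
-- what changed: Replaces the index loop and its three-way branch with a case analysis plus closed-form concatenation of three segments: ['RED'], size-2 blanks, ['VIOLET'].
import Mathlib
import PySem

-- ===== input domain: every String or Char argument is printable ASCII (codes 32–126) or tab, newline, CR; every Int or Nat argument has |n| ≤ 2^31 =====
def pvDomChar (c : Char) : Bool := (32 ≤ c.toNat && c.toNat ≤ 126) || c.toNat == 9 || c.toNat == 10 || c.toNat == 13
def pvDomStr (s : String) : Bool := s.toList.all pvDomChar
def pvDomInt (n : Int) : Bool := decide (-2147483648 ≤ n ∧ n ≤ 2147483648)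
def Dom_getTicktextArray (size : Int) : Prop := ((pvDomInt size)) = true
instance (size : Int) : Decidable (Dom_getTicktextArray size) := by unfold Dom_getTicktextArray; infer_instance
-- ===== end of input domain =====

-- B: case analysis plus closed-form concatenation of three segments instead of a per-index loop (objective: simpler).
-- ===== PORT A =====
def getTicktextArray (size : Int) : List String :=
  (PySem.List.pyRange 0 size 1).foldl (fun acc i =>
    acc ++ [if i = 0 then "RED" else if i = size - 1 then "VIOLET" else ""]) []

-- ===== PORT B =====
def getTicktextArray_alt (size : Int) : List String :=
  if size ≤ 0 then []
  else if size = 1 then ["RED"]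
  else ["RED"] ++ List.replicate (size - 2).toNat "" ++ ["VIOLET"]

-- ===== PRECONDITION & SPEC =====
def Spec_getTicktextArray (size : Int) (out : List String) : Prop := out = getTicktextArray_alt size
instance (size : Int) (out : List String) : Decidable (Spec_getTicktextArray size out) := by unfold Spec_getTicktextArray; infer_instance

-- ===== CLAIM (what is proved, stated in full; the proofs are below) =====
def Claim_equal_getTicktextArray : Prop := ∀ (size : Int), Dom_getTicktextArray size → Spec_getTicktextArray size (getTicktextArray size)

-- ===== LEMMAS AND PROOFS =====

theorem getTicktextArray_main (size : Int) :
    getTicktextArray size = getTicktextArray_alt size := by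
  unfold getTicktextArray getTicktextArray_alt
  rw [PySem.List.foldl_append_singleton_eq_map]
  rcases (show size ≤ 0 ∨ 0 < size by omega) with h | h
  · simp [PySem.List.pyRange, h]
  · obtain ⟨n, rfl⟩ : ∃ m : Nat, size = (m : Int) := ⟨size.toNat, (Int.toNat_of_nonneg h.le).symm⟩
    rw [PySem.List.pyRange_zero_natCast]
    have hn : 0 < n := by exact_mod_cast h
    split_ifs with h0 h1
    · exfalso; omega
    · have : n = 1 := by omega
      subst this; decide
    · have hn2 : 2 ≤ n := by omega
      apply List.ext_getElem
      · simp; omega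
      · intro k hk1 hk2
        simp only [List.nil_append, List.getElem_map, List.getElem_range]
        rcases (show k = 0 ∨ (0 < k ∧ k < n - 1) ∨ k = n - 1 by
          simp at hk1; omega) with rfl | ⟨hk0, hklt⟩ | rfl
        · simp
        · have : ¬((k : Int) = 0) := by omega
          have h2 : ¬((k : Int) = (n : Int) - 1) := by omega
          simp only [this, h2, if_false]
          rw [List.getElem_append_left, List.getElem_append_right] <;>
            simp <;> omega
        · rw [if_neg (by omega : ¬(((n - 1 : Nat) : Int) = 0)),
            if_pos (by omega : (((n - 1 : Nat) : Int) = (n : Int) - 1))]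
          rw [List.getElem_append_right] <;> simp <;> omega

-- ===== VERDICT (by name: the statement is the Claim_ definition above) =====
theorem getTicktextArray_spec : Claim_equal_getTicktextArray := by
  intro size _
  exact getTicktextArray_main size
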